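-- pv_equiv track=rewrite | github.com/Todaime/KBP | src/dwie/preprocessing_atlop.py | get_mentions_indexes
-- ===== SOURCE A (Python) =====
-- def get_mentions_indexes(tagged_mentions: list) -> list:
--     """Return the offsets of each mentions.
--
--     Args:
--         tagged_mentions (list): _description_
--
--     Returns:
--         list: mentions spans
--     """
--     mentions_indexes = []
--     index = 0
--     while index < (len(tagged_mentions)):
--         start_position = index
--         val = tagged_mentions[index]
--
--         while index < len(tagged_mentions) and tagged_mentions[index] == val:
--             index += 1
--         end_position = index - 1
--
--         if val != "":
--             mentions_indexes.append((val, start_position, end_position))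
--     return mentions_indexes
-- ===== SOURCE B (Python) =====
-- def get_mentions_indexes(tagged_mentions: list) -> list:
--     """Return the offsets of each mentions (staged: boundary indices, then pairing)."""
--     n = len(tagged_mentions)
--     starts = [i for i in range(n)
--               if i == 0 or tagged_mentions[i] != tagged_mentions[i - 1]]
--     return [(tagged_mentions[s], s, e - 1)
--             for s, e in zip(starts, starts[1:] + [n])
--             if tagged_mentions[s] != ""]
-- ===== Notes on version B (the rewrite author's own statement) =====
-- stated objective: alternative
-- what changed: Replaced the nested-while two-pointer run scan by two staged passes: a comprehension collecting all run-boundary indices (i==0 or a value change), then a zip of each start with the next start (or len) to pair spans, filtering empty tags.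
import Mathlib
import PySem

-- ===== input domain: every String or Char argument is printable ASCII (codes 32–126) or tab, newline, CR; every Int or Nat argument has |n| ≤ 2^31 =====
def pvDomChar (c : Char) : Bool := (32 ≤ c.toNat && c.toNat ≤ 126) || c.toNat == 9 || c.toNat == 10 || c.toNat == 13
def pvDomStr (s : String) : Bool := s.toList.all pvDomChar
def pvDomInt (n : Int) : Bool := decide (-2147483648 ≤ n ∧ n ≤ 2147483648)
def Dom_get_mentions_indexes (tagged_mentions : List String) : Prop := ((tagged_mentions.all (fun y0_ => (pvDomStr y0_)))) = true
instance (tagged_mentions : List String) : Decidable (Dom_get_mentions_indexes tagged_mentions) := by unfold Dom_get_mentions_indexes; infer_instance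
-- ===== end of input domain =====

-- B replaces A's nested-while two-pointer run scan by two staged passes:
-- collect all run-boundary indices, then pair each with the next boundary (alternative decomposition).

-- ===== PORT A =====
-- inner `while index < len(tagged_mentions) and tagged_mentions[index] == val: index += 1`
def aInner (xs : List String) (val : String) (index : Nat) : Nat :=
  if h : index < xs.length ∧ xs.getD index "" == val then aInner xs val (index + 1) else index
termination_by xs.length - index
decreasing_by omega

theorem aInner_le (xs : List String) (val : String) (index : Nat) :
    index ≤ aInner xs val index := by
  fun_induction aInner xs val index with
  | case1 i h ih => omega
  | case2 i h => omega

-- at entry of the outer loop body the inner loop advances at least once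
theorem aInner_gt (xs : List String) (index : Nat) (h : index < xs.length) :
    index < aInner xs (xs.getD index "") index := by
  rw [aInner, dif_pos ⟨h, by simp⟩]
  exact lt_of_lt_of_le (Nat.lt_succ_self _) (aInner_le _ _ _)

-- outer `while index < len(tagged_mentions)` loop
def aOuter (xs : List String) (index : Nat) : List (String × Int × Int) :=
  if h : index < xs.length then
    let start_position := index
    let val := xs.getD index ""
    let index' := aInner xs val index
    let end_position : Int := (index' : Int) - 1
    (if val ≠ "" then [(val, (start_position : Int), end_position)] else []) ++ aOuter xs index'
  else []
termination_by xs.length - index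
decreasing_by have := aInner_gt xs index h; omega

def get_mentions_indexes (tagged_mentions : List String) : List (String × Int × Int) :=
  aOuter tagged_mentions 0

-- ===== PORT B =====
-- `starts = [i for i in range(n) if i == 0 or xs[i] != xs[i-1]]`
-- (indices produced by the comprehension are always in range, so getD is exact here)
def bStarts (xs : List String) : List Nat :=
  (List.range xs.length).filter (fun i => i == 0 || !(xs.getD i "" == xs.getD (i - 1) ""))

-- `[(xs[s], s, e - 1) for s, e in zip(starts, starts[1:] + [n]) if xs[s] != ""]`
def get_mentions_indexes_alt (tagged_mentions : List String) : List (String × Int × Int) :=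
  let starts := bStarts tagged_mentions
  (starts.zip (starts.drop 1 ++ [tagged_mentions.length])).filterMap
    (fun p => if tagged_mentions.getD p.1 "" ≠ "" then
        some (tagged_mentions.getD p.1 "", (p.1 : Int), (p.2 : Int) - 1) else none)

-- ===== PRECONDITION & SPEC =====
def Spec_get_mentions_indexes (tagged_mentions : List String) (out : List (String × Int × Int)) : Prop := out = get_mentions_indexes_alt tagged_mentions
instance (tagged_mentions : List String) (out : List (String × Int × Int)) : Decidable (Spec_get_mentions_indexes tagged_mentions out) := by unfold Spec_get_mentions_indexes; infer_instance

-- ===== CLAIM (what is proved, stated in full; the proofs are below) =====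
def Claim_equal_get_mentions_indexes : Prop := ∀ (tagged_mentions : List String), Dom_get_mentions_indexes tagged_mentions → Spec_get_mentions_indexes tagged_mentions (get_mentions_indexes tagged_mentions)

-- ===== LEMMAS AND PROOFS =====

-- common specification: spans of maximal runs, skipping empty tags
def runsSpec : List String → Int → List (String × Int × Int)
  | [], _ => []
  | v :: rest, off =>
    (if v ≠ "" then [(v, off, off + (rest.takeWhile (· == v)).length)] else [])
      ++ runsSpec (rest.dropWhile (· == v)) (off + 1 + (rest.takeWhile (· == v)).length)
termination_by xs _ => xs.length
decreasing_by
  simp only [List.length_cons]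
  have := List.length_dropWhile_le (p := (· == v)) (l := rest)
  omega

theorem dropWhile_eq_drop {α : Type} (p : α → Bool) (l : List α) :
    l.dropWhile p = l.drop (l.takeWhile p).length := by
  induction l with
  | nil => simp
  | cons a l ih =>
    by_cases h : p a
    · simp [List.dropWhile_cons, List.takeWhile_cons, h, ih]
    · simp [List.dropWhile_cons, List.takeWhile_cons, h]

theorem runsSpec_nil (o : Int) : runsSpec [] o = [] := by rw [runsSpec]

theorem runsSpec_cons (v : String) (rest : List String) (o : Int) :
    runsSpec (v :: rest) o
      = (if v ≠ "" then [(v, o, o + ((rest.takeWhile (· == v)).length : Int))] else [])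
        ++ runsSpec (rest.dropWhile (· == v)) (o + 1 + ((rest.takeWhile (· == v)).length : Int)) := by
  rw [runsSpec]

theorem aInner_eq (xs : List String) (val : String) (index : Nat) :
    aInner xs val index = index + ((xs.drop index).takeWhile (· == val)).length := by
  fun_induction aInner xs val index with
  | case1 i h ih =>
    obtain ⟨hlt, hv⟩ := h
    have hg : xs.getD i "" = xs[i] := List.getD_eq_getElem xs "" hlt
    rw [hg] at hv
    rw [List.drop_eq_getElem_cons hlt, List.takeWhile_cons, hv]
    simp only [if_true, List.length_cons]
    omega
  | case2 i h =>
    rcases Nat.lt_or_ge i xs.length with hlt | hge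
    · have hg : xs.getD i "" = xs[i] := List.getD_eq_getElem xs "" hlt
      have hv : (xs[i] == val) = false := by
        rcases Bool.eq_false_or_eq_true (xs[i] == val) with ht | hf
        · exact absurd ⟨hlt, hg ▸ ht⟩ h
        · exact hf
      rw [List.drop_eq_getElem_cons hlt, List.takeWhile_cons, hv]
      simp
    · rw [List.drop_eq_nil_of_le hge]
      simp

theorem aOuter_eq (xs : List String) (index : Nat) :
    aOuter xs index = runsSpec (xs.drop index) (index : Int) := by
  fun_induction aOuter xs index with
  | case1 i h start val index' endp ih =>
    have hval : xs[i] = val := (List.getD_eq_getElem xs "" h).symm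
    have hdrop : xs.drop i = val :: xs.drop (i + 1) := by
      rw [List.drop_eq_getElem_cons h, hval]
    have hA := aInner_eq xs val i
    rw [hdrop, List.takeWhile_cons, beq_self_eq_true] at hA
    simp only [if_true, List.length_cons] at hA
    have hidx : index' = i + 1 + ((xs.drop (i + 1)).takeWhile (· == val)).length := by
      show aInner xs val i = _
      omega
    have hdw : xs.drop index' = (xs.drop (i + 1)).dropWhile (· == val) := by
      rw [dropWhile_eq_drop, List.drop_drop, hidx]
    rw [ih, hdw]
    conv_rhs => rw [hdrop, runsSpec]
    have e1 : endp = (i : Int) + (((xs.drop (i + 1)).takeWhile (· == val)).length : Int) := by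
      show (index' : Int) - 1 = _
      rw [hidx]; push_cast; ring
    have e2 : ((index' : Nat) : Int) = (i : Int) + 1 + (((xs.drop (i + 1)).takeWhile (· == val)).length : Int) := by
      rw [hidx]; push_cast; ring
    rw [e1, e2]
  | case2 i h =>
    have : xs.drop i = [] := List.drop_eq_nil_of_le (by omega)
    rw [this, runsSpec]

-- every element xs.getD j "" within the initial run (j < |takeWhile|) equals v
theorem getD_takeWhile (rest : List String) (v : String) (j : Nat)
    (hj : j < (rest.takeWhile (· == v)).length) : rest.getD j "" = v := by
  induction rest generalizing j with
  | nil => simp at hj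
  | cons a l ih =>
    by_cases ha : (a == v) = true
    · rw [List.takeWhile_cons, if_pos ha] at hj
      cases j with
      | zero => simpa using ha
      | succ j' =>
        simp only [List.length_cons] at hj
        simpa [List.getD] using ih j' (by omega)
    · rw [List.takeWhile_cons, if_neg ha] at hj
      simp at hj

-- in xs = v :: rest, indices 0..k (k = run length) all hold v
theorem getD_le_k (v : String) (rest : List String) (j : Nat)
    (hj : j ≤ (rest.takeWhile (· == v)).length) : (v :: rest).getD j "" = v := by
  cases j with
  | zero => rfl
  | succ j' =>
    have : rest.getD j' "" = v := getD_takeWhile rest v j' (by omega)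
    simpa [List.getD] using this

-- head of dropWhile fails the predicate
theorem dropWhile_head_ne (v a : String) (l m : List String)
    (h : l.dropWhile (· == v) = a :: m) : (a == v) = false := by
  induction l with
  | nil => simp at h
  | cons b l' ih =>
    by_cases hb : (b == v) = true
    · rw [List.dropWhile_cons, if_pos hb] at h
      exact ih h
    · rw [List.dropWhile_cons, if_neg hb] at h
      cases h
      simpa using hb

-- getD shift across the first run: xs index k+1+j corresponds to tail index j
theorem getD_shift (v : String) (rest : List String) (j : Nat) :
    (v :: rest).getD ((rest.takeWhile (· == v)).length + 1 + j) ""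
      = (rest.dropWhile (· == v)).getD j "" := by
  have h1 : (v :: rest).getD ((rest.takeWhile (· == v)).length + 1 + j) ""
      = rest.getD ((rest.takeWhile (· == v)).length + j) "" := by
    have : (rest.takeWhile (· == v)).length + 1 + j
        = ((rest.takeWhile (· == v)).length + j) + 1 := by omega
    rw [this]; simp [List.getD]
  rw [h1, dropWhile_eq_drop, List.getD_eq_getElem?_getD, List.getD_eq_getElem?_getD,
    List.getElem?_drop]

-- the boundary list of a nonempty list starts with 0
theorem bStarts_head (a : String) (l : List String) :
    ∃ S', bStarts (a :: l) = 0 :: S' := by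
  refine ⟨((List.range l.length).map (1 + ·)).filter
    (fun i => i == 0 || !((a :: l).getD i "" == (a :: l).getD (i - 1) "")), ?_⟩
  unfold bStarts
  have : (a :: l).length = 1 + l.length := by simp; omega
  rw [this, List.range_add, List.filter_append, List.range_one]
  simp

-- structural characterisation: boundaries of v :: rest = 0 followed by the
-- boundaries of the remainder after the first run, shifted by the run length
theorem bStarts_cons (v : String) (rest : List String) :
    bStarts (v :: rest)
      = 0 :: (bStarts (rest.dropWhile (· == v))).map
          (fun j => (rest.takeWhile (· == v)).length + 1 + j) := by
  have hsplit : (rest.takeWhile (· == v)).length + (rest.dropWhile (· == v)).length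
      = rest.length := by
    conv_rhs => rw [← List.takeWhile_append_dropWhile (p := (· == v)) (l := rest)]
    rw [List.length_append]
  set k := (rest.takeWhile (· == v)).length with hk
  set tail := rest.dropWhile (· == v) with htail
  have hlen : (v :: rest).length = (k + 1) + tail.length := by simp; omega
  unfold bStarts
  rw [hlen, List.range_add, List.filter_append, List.filter_map]
  have part1 : (List.range (k + 1)).filter
      (fun i => i == 0 || !((v :: rest).getD i "" == (v :: rest).getD (i - 1) "")) = [0] := by
    have hcongr : (List.range (k + 1)).filter
        (fun i => i == 0 || !((v :: rest).getD i "" == (v :: rest).getD (i - 1) ""))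
        = (List.range (k + 1)).filter (fun i => i == 0) := by
      apply List.filter_congr
      intro i hi
      have hi' : i < k + 1 := List.mem_range.mp hi
      cases i with
      | zero => simp
      | succ j =>
        have e1 : (v :: rest).getD (j + 1) "" = v := getD_le_k v rest (j + 1) (by omega)
        have e2 : (v :: rest).getD (j + 1 - 1) "" = v := getD_le_k v rest j (by omega)
        simp only [Nat.add_sub_cancel] at e2 ⊢
        rw [e1, e2]
        simp
    rw [hcongr]
    have : k + 1 = 1 + k := by omega
    rw [this, List.range_add, List.filter_append, List.filter_map, List.range_one]
    simp
  rw [part1, List.singleton_append]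
  congr 1
  congr 1
  apply List.filter_congr
  intro j hj
  have hj' : j < tail.length := List.mem_range.mp hj
  simp only [Function.comp]
  have hne : ((k + 1 + j == 0) : Bool) = false := by simp
  have e1 : (v :: rest).getD (k + 1 + j) "" = tail.getD j "" := getD_shift v rest j
  cases j with
  | zero =>
    obtain ⟨a, m, hm⟩ : ∃ a m, tail = a :: m := by
      cases htl : tail with
      | nil => rw [htl] at hj'; simp at hj'
      | cons a m => exact ⟨a, m, rfl⟩
    have e2 : (v :: rest).getD (k + 1 + 0 - 1) "" = v := by
      have : k + 1 + 0 - 1 = k := by omega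
      rw [this]; exact getD_le_k v rest k (le_refl _)
    have hav : (a == v) = false := by
      refine dropWhile_head_ne v a rest m ?_
      rw [← htail]; exact hm
    rw [hne, e1, e2, hm]
    simp [List.getD, hav]
  | succ j' =>
    have e2 : (v :: rest).getD (k + 1 + (j' + 1) - 1) "" = tail.getD j' "" := by
      have : k + 1 + (j' + 1) - 1 = k + 1 + j' := by omega
      rw [this]; exact getD_shift v rest j'
    rw [hne, e1, e2]
    simp

-- runsSpec commutes with shifting the offset
theorem runsSpec_shift (l : List String) (o a : Int) :
    runsSpec l (o + a) = (runsSpec l o).map (fun q => (q.1, q.2.1 + a, q.2.2 + a)) := by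
  fun_induction runsSpec l o with
  | case1 o => simp [runsSpec_nil]
  | case2 v rest o ih =>
    rw [runsSpec_cons, List.map_append]
    congr 1
    · by_cases hv : v ≠ "" <;> simp [hv] <;> ring
    · have harith : o + a + 1 + ((rest.takeWhile (· == v)).length : Int)
          = (o + 1 + ((rest.takeWhile (· == v)).length : Int)) + a := by ring
      rw [harith, ih]

theorem alt_eq_runs (xs : List String) :
    get_mentions_indexes_alt xs = runsSpec xs 0 := by
  suffices H : ∀ n (xs : List String), xs.length = n →
      get_mentions_indexes_alt xs = runsSpec xs 0 from H xs.length xs rfl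
  intro n
  induction n using Nat.strong_induction_on with
  | _ n IH =>
    intro xs hlen
    cases xs with
    | nil => simp [get_mentions_indexes_alt, bStarts, runsSpec_nil]
    | cons v rest =>
      have hsplit : (rest.takeWhile (· == v)).length + (rest.dropWhile (· == v)).length
          = rest.length := by
        conv_rhs => rw [← List.takeWhile_append_dropWhile (p := (· == v)) (l := rest)]
        rw [List.length_append]
      set k := (rest.takeWhile (· == v)).length with hk
      set tail := rest.dropWhile (· == v) with htail
      have hxlen : (v :: rest).length = (k + 1) + tail.length := by simp; omega
      have hIH : get_mentions_indexes_alt tail = runsSpec tail 0 := by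
        apply IH tail.length _ tail rfl
        simp only [List.length_cons] at hlen
        omega
      show get_mentions_indexes_alt (v :: rest) = runsSpec (v :: rest) 0
      rw [get_mentions_indexes_alt, bStarts_cons]
      cases htl : tail with
      | nil =>
        have hS : bStarts (rest.dropWhile (· == v)) = [] := by
          rw [← htail, htl]; rfl
        rw [hS]
        have hklen : k = rest.length := by
          rw [htl] at hsplit; simpa using hsplit
        have hdw : rest.dropWhile (· == v) = [] := by rw [← htail, htl]
        simp only [List.map_nil, List.drop_succ_cons, List.drop_nil, List.nil_append,
          List.zip_cons_cons, List.zip_nil_right, List.filterMap_cons, List.filterMap_nil]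
        conv_rhs => rw [runsSpec_cons]
        rw [hdw, runsSpec_nil, List.append_nil]
        have hget0 : (v :: rest).getD 0 "" = v := rfl
        rw [hget0]
        by_cases hv : v = ""
        · simp [hv]
        · have hv' : v ≠ "" := hv
          simp only [hv', if_true, ne_eq, not_false_iff, if_pos hv']
          have : ((v :: rest).length : Int) - 1 = 0 + ((rest.takeWhile (· == v)).length : Int) := by
            simp only [List.length_cons]; omega
          simp [this]
          omega
      | cons a m =>
        obtain ⟨S', hS'⟩ := bStarts_head a m
        have hS : bStarts (rest.dropWhile (· == v)) = 0 :: S' := by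
          rw [← htail, htl]; exact hS'
        rw [hS]
        simp only [List.map_cons, List.drop_succ_cons, List.drop_zero, List.cons_append,
          List.zip_cons_cons]
        rw [List.filterMap_cons]
        have hlenf : (v :: rest).length = k + 1 + tail.length := hxlen
        have hzip : (((0 : Nat) :: S').map (fun j => k + 1 + j)).zip
              ((S'.map (fun j => k + 1 + j)) ++ [(v :: rest).length])
            = (((0 : Nat) :: S').zip (S' ++ [tail.length])).map
                (Prod.map (fun j => k + 1 + j) (fun j => k + 1 + j)) := by
          have h2 : (S'.map (fun j => k + 1 + j)) ++ [(v :: rest).length]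
              = (S' ++ [tail.length]).map (fun j => k + 1 + j) := by
            rw [List.map_append, hlenf]; rfl
          rw [h2, List.zip_map]
        simp only [List.map_cons] at hzip
        rw [hzip, List.filterMap_map]
        have hshift : ∀ j : Nat, (v :: rest).getD (k + 1 + j) "" = tail.getD j "" := by
          intro j
          rw [hk, htail]
          exact getD_shift v rest j
        have hfun : (fun (p : Nat × Nat) =>
              (if (v :: rest).getD p.1 "" ≠ "" then
                some ((v :: rest).getD p.1 "", (p.1 : Int), (p.2 : Int) - 1) else none))
              ∘ (Prod.map (fun j => k + 1 + j) (fun j => k + 1 + j))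
            = fun (p : Nat × Nat) =>
              Option.map (fun q : String × Int × Int =>
                  (q.1, q.2.1 + ((k : Int) + 1), q.2.2 + ((k : Int) + 1)))
                (if tail.getD p.1 "" ≠ "" then
                  some (tail.getD p.1 "", (p.1 : Int), (p.2 : Int) - 1) else none) := by
          funext p
          obtain ⟨a', b'⟩ := p
          simp only [Function.comp, Prod.map, hshift]
          by_cases hval : tail.getD a' "" = ""
          · rw [if_neg (not_not_intro hval), if_neg (not_not_intro hval)]
            rfl
          · have hval' : tail.getD a' "" ≠ "" := hval
            rw [if_pos hval', if_pos hval', Option.map_some]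
            refine congrArg some ?_
            refine Prod.ext rfl (Prod.ext ?_ ?_) <;> (show _ = _) <;> push_cast <;> ring
        rw [hfun]
        rw [← List.map_filterMap]
        have halt : List.filterMap
              (fun (p : Nat × Nat) =>
                if tail.getD p.1 "" ≠ "" then
                  some (tail.getD p.1 "", (p.1 : Int), (p.2 : Int) - 1) else none)
              (((0 : Nat) :: S').zip (S' ++ [tail.length]))
            = runsSpec tail 0 := by
          rw [← hIH]
          rw [get_mentions_indexes_alt]
          simp only [htail ▸ hS, List.drop_succ_cons, List.drop_zero]
        rw [halt]
        conv_rhs => rw [runsSpec_cons]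
        have harith : (0 : Int) + 1 + ((rest.takeWhile (· == v)).length : Int)
            = 0 + ((k : Int) + 1) := by rw [← hk]; ring
        rw [harith, runsSpec_shift]
        have htails : runsSpec (rest.dropWhile (· == v)) 0 = runsSpec tail 0 := by rw [← htail]
        rw [htails]
        congr 1
        have hget0 : (v :: rest).getD 0 "" = v := rfl
        rw [hget0]
        by_cases hv : v = ""
        · simp [hv]
        · have harith2 : ((k + 1 + 0 : Nat) : Int) - 1
              = 0 + ((rest.takeWhile (· == v)).length : Int) := by
            rw [← hk]; push_cast; ring
          simp [hv, harith2]

-- ===== VERDICT (by name: the statement is the Claim_ definition above) =====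
theorem get_mentions_indexes_spec : Claim_equal_get_mentions_indexes := by
  intro xs _
  show get_mentions_indexes xs = get_mentions_indexes_alt xs
  rw [get_mentions_indexes, aOuter_eq, alt_eq_runs]
  simp
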